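-- pv_equiv track=rewrite | github.com/ScottCTD/bill_helper | backend/services/agent/agent_attachment_bundle.py | _replace_path_breaking_characters
-- ===== SOURCE A (Python) =====
-- def _replace_path_breaking_characters(value: str) -> str:
--     cleaned: list[str] = []
--     for char in value:
--         codepoint = ord(char)
--         if char in {"/", "\\"} or codepoint == 0 or codepoint < 32 or codepoint == 127:
--             cleaned.append("_")
--             continue
--         cleaned.append(char)
--     return "".join(cleaned)
-- ===== SOURCE B (Python) =====
-- def _is_bad(char: str) -> bool:
--     cp = ord(char)
--     return cp < 32 or cp == 127 or cp == 47 or cp == 92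
--
--
-- def _replace_path_breaking_characters(value: str) -> str:
--     # Run-based: copy maximal clean runs as slices, emit '_' * len for bad runs.
--     pieces: list[str] = []
--     i, n = 0, len(value)
--     while i < n:
--         j = i
--         while j < n and not _is_bad(value[j]):
--             j += 1
--         pieces.append(value[i:j])
--         k = j
--         while k < n and _is_bad(value[k]):
--             k += 1
--         pieces.append("_" * (k - j))
--         i = k
--     return "".join(pieces)
-- ===== Notes on version B (the rewrite author's own statement) =====
-- stated objective: alternative
-- what changed: Instead of A's per-character branch-and-append loop, B scans the string run by run: it slices out each maximal run of clean characters unchanged and emits '_' multiplied by the length of each maximal run of offending characters, joining the run pieces at the end.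
import Mathlib
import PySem

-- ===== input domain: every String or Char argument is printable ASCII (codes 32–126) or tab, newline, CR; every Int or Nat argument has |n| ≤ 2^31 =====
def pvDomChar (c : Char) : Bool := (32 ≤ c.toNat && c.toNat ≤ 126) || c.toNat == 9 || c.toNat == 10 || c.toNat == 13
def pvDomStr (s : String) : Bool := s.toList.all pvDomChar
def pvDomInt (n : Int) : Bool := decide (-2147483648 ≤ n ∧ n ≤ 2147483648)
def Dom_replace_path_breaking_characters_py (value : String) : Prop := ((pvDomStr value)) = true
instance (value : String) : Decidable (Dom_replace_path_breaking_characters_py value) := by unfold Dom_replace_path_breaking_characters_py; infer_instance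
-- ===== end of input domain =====

-- B replaces A's per-character branch-and-append loop by a run-based scan: maximal clean
-- runs are copied whole, each maximal bad run becomes '_' repeated by its length (alternative).

-- ===== PORT A =====
def replace_path_breaking_characters_py (value : String) : String :=
  let cleaned : List String :=
    value.toList.foldl (fun acc char =>
      let codepoint : Nat := char.toNat
      if char = '/' ∨ char = '\\' ∨ codepoint = 0 ∨ codepoint < 32 ∨ codepoint = 127 then
        acc ++ ["_"]
      else
        acc ++ [String.ofList [char]]) []
  PySem.Str.join "" cleaned

-- ===== PORT B =====
-- _is_bad(char): cp = ord(char); cp < 32 or cp == 127 or cp == 47 or cp == 92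
def pvIsBad (c : Char) : Bool :=
  let cp := c.toNat
  cp < 32 || cp == 127 || cp == 47 || cp == 92

-- termination of pvPieces: each outer iteration consumes at least one character
lemma pvRest2_lt (c : Char) (t : List Char) :
    (((c :: t).dropWhile (fun x => !pvIsBad x)).dropWhile pvIsBad).length < (c :: t).length := by
  simp only [List.length_cons]
  by_cases hb : pvIsBad c
  · have h1 : (c :: t).dropWhile (fun x => !pvIsBad x) = c :: t := by
      simp [hb]
    rw [h1]
    have h2 : (c :: t).dropWhile pvIsBad = t.dropWhile pvIsBad := by
      simp [hb]
    rw [h2]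
    have := List.length_dropWhile_le pvIsBad t
    omega
  · have h1 : (c :: t).dropWhile (fun x => !pvIsBad x) = t.dropWhile (fun x => !pvIsBad x) := by
      simp [hb]
    rw [h1]
    have h2 := List.length_dropWhile_le pvIsBad (t.dropWhile (fun x => !pvIsBad x))
    have h3 := List.length_dropWhile_le (fun x => !pvIsBad x) t
    omega

-- the outer while loop of Source B: each iteration takes one clean run (inner `while j` loop
-- = takeWhile of non-bad chars, the slice value[i:j]) and one bad run (inner `while k`
-- loop = takeWhile of bad chars, emitted as '_' * (k - j)), then continues at i = k.
def pvPieces : List Char → List String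
  | [] => []
  | c :: t =>
    let good := (c :: t).takeWhile (fun x => !pvIsBad x)
    let rest1 := (c :: t).dropWhile (fun x => !pvIsBad x)
    let badrun := rest1.takeWhile pvIsBad
    let rest2 := rest1.dropWhile pvIsBad
    String.ofList good :: String.ofList (List.replicate badrun.length '_') :: pvPieces rest2
termination_by cs => cs.length
decreasing_by exact pvRest2_lt c t

def replace_path_breaking_characters_py_alt (value : String) : String :=
  PySem.Str.join "" (pvPieces value.toList)

-- ===== PRECONDITION & SPEC =====
def Spec_replace_path_breaking_characters_py (value : String) (out : String) : Prop := out = replace_path_breaking_characters_py_alt value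
instance (value : String) (out : String) : Decidable (Spec_replace_path_breaking_characters_py value out) := by unfold Spec_replace_path_breaking_characters_py; infer_instance

-- ===== CLAIM (what is proved, stated in full; the proofs are below) =====
def Claim_equal_replace_path_breaking_characters_py : Prop := ∀ (value : String), Dom_replace_path_breaking_characters_py value → Spec_replace_path_breaking_characters_py value (replace_path_breaking_characters_py value)

-- ===== LEMMAS AND PROOFS =====

-- the per-character substitution both programs implement
def pvSub (c : Char) : Char := if pvIsBad c then '_' else c

lemma pvChar_eq_iff {c d : Char} : c = d ↔ c.toNat = d.toNat := by
  rw [Char.ext_iff, ← UInt32.toNat_inj]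
  rfl

lemma pvIsBad_iff (c : Char) :
    pvIsBad c = true ↔ (c = '/' ∨ c = '\\' ∨ c.toNat = 0 ∨ c.toNat < 32 ∨ c.toNat = 127) := by
  have h47 : (c = '/') ↔ c.toNat = 47 := pvChar_eq_iff
  have h92 : (c = '\\') ↔ c.toNat = 92 := pvChar_eq_iff
  simp only [pvIsBad, Bool.or_eq_true, decide_eq_true_eq, beq_iff_eq, h47, h92]
  omega

lemma pvJoin_empty_flatten (L : List (List Char)) :
    PySem.Chars.join [] L = L.flatten := by
  induction L with
  | nil => simp [PySem.Chars.join_nil]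
  | cons a T ih =>
    cases T with
    | nil => simp [PySem.Chars.join_singleton]
    | cons b T' =>
      rw [PySem.Chars.join_cons_cons, List.flatten_cons, ← ih]
      simp

lemma pvPieces_flatten_aux (n : Nat) :
    ∀ cs : List Char, cs.length ≤ n → ((pvPieces cs).map String.toList).flatten = cs.map pvSub := by
  induction n with
  | zero =>
    intro cs h
    have : cs = [] := List.eq_nil_of_length_eq_zero (Nat.le_zero.mp h)
    subst this
    simp [pvPieces]
  | succ n ih =>
    intro cs h
    cases cs with
    | nil => simp [pvPieces]
    | cons c t =>
      have hlt := pvRest2_lt c t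
      have hlen : ((((c :: t).dropWhile (fun x => !pvIsBad x)).dropWhile pvIsBad)).length ≤ n := by
        simp only [List.length_cons] at h hlt
        omega
      have hgood : ((c :: t).takeWhile (fun x => !pvIsBad x)).map pvSub = (c :: t).takeWhile (fun x => !pvIsBad x) := by
        have hc : ∀ x ∈ (c :: t).takeWhile (fun x => !pvIsBad x), pvSub x = id x := by
          intro x hx
          have hb := List.mem_takeWhile_imp hx
          simp only [Bool.not_eq_eq_eq_not, Bool.not_true] at hb
          simp [pvSub, hb]
        rw [List.map_congr_left hc, List.map_id]
      have hbad : (((c :: t).dropWhile (fun x => !pvIsBad x)).takeWhile pvIsBad).map pvSub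
          = List.replicate (((c :: t).dropWhile (fun x => !pvIsBad x)).takeWhile pvIsBad).length '_' := by
        rw [List.eq_replicate_iff]
        refine ⟨by simp, ?_⟩
        intro x hx
        obtain ⟨y, hy, rfl⟩ := List.mem_map.mp hx
        have := List.mem_takeWhile_imp hy
        simp [pvSub, this]
      have hsplit1 : ((c :: t).takeWhile (fun x => !pvIsBad x)) ++ ((c :: t).dropWhile (fun x => !pvIsBad x)) = c :: t :=
        List.takeWhile_append_dropWhile
      have hsplit2 : (((c :: t).dropWhile (fun x => !pvIsBad x)).takeWhile pvIsBad) ++ (((c :: t).dropWhile (fun x => !pvIsBad x)).dropWhile pvIsBad) = (c :: t).dropWhile (fun x => !pvIsBad x) :=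
        List.takeWhile_append_dropWhile
      rw [pvPieces]
      simp only [List.map_cons, List.flatten_cons, String.toList_ofList]
      rw [ih _ hlen]
      rw [show pvSub c :: List.map pvSub t = List.map pvSub (c :: t) from rfl]
      conv_rhs => rw [← hsplit1]
      rw [List.map_append, hgood]
      conv_rhs => rw [← hsplit2]
      rw [List.map_append, hbad]

lemma pvPieces_flatten (cs : List Char) :
    ((pvPieces cs).map String.toList).flatten = cs.map pvSub :=
  pvPieces_flatten_aux cs.length cs le_rfl

lemma pvFlatten_singletons (l : List Char) (g : Char → Char) :
    (l.map (fun c => [g c])).flatten = l.map g := by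
  induction l with
  | nil => rfl
  | cons a t ih => simp [ih]

-- ===== VERDICT (by name: the statement is the Claim_ definition above) =====
theorem replace_path_breaking_characters_py_spec : Claim_equal_replace_path_breaking_characters_py := by
  intro value _
  unfold Spec_replace_path_breaking_characters_py
  show replace_path_breaking_characters_py value = _
  unfold replace_path_breaking_characters_py replace_path_breaking_characters_py_alt
  simp only []
  rw [show (fun (acc : List String) (char : Char) =>
        if char = '/' ∨ char = '\\' ∨ char.toNat = 0 ∨ char.toNat < 32 ∨ char.toNat = 127 then acc ++ ["_"]
        else acc ++ [String.ofList [char]])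
      = (fun acc char => acc ++ [if char = '/' ∨ char = '\\' ∨ char.toNat = 0 ∨ char.toNat < 32 ∨ char.toNat = 127 then "_" else String.ofList [char]]) from by
        funext acc char; split <;> rfl]
  rw [PySem.List.foldl_append_singleton_eq_map]
  apply String.toList_inj.mp
  simp only [PySem.Str.toList_join, String.toList_empty]
  rw [pvJoin_empty_flatten, pvJoin_empty_flatten, pvPieces_flatten]
  simp only [List.nil_append, List.map_map]
  rw [show (String.toList ∘ fun char => if char = '/' ∨ char = '\\' ∨ char.toNat = 0 ∨ char.toNat < 32 ∨ char.toNat = 127 then "_" else String.ofList [char])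
      = (fun c => [pvSub c]) from by
        funext c
        simp only [Function.comp]
        by_cases h : pvIsBad c
        · rw [if_pos ((pvIsBad_iff c).mp h)]
          simp [pvSub, h]
        · rw [if_neg (fun hc => h ((pvIsBad_iff c).mpr hc))]
          simp [pvSub, h]]
  rw [pvFlatten_singletons]
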